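-- pv_equiv track=rewrite | github.com/univention/univention-corporate-server | base/univention-updater/modules/univention/updater/scripts/statistics.py | encode_additional_info
-- ===== SOURCE A (Python) =====
-- from typing import Any, Callable, List, NoReturn, Optional, Tuple
--
-- def encode_number(number: int, significant_digits: int = 3) -> str:
-- 	assert 0 <= number <= int('9' * 26)
-- 	assert 1 < significant_digits
-- 	string = str(number)
-- 	return string[:significant_digits] + ' abcdefghijklmnopqrstuvwxyz'[len(string)]
--
-- def encode_users(users: int) -> str:
-- 	return encode_number(users)
--
-- def encode_role(role: str) -> str:
-- 	if role == 'domaincontroller_master':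
-- 		return 'M'
-- 	if role == 'domaincontroller_backup':
-- 		return 'B'
-- 	if role == 'domaincontroller_slave':
-- 		return 'S'
-- 	if role == 'memberserver':
-- 		return 'm'
-- 	if role == 'basesystem':
-- 		return 'b'
-- 	raise ValueError('Invalid role %r' % (role, ))
--
-- def encode_additional_info(users: Optional[int] = None, role: Optional[str] = None) -> str:
-- 	data: List[Tuple[str, Callable[[Any], str], Any]] = [
-- 		('U', encode_users, users),
-- 		('R', encode_role, role),
-- 	]
-- 	return ",".join(
-- 		"%s:%s" % (key, encoder(datum))
-- 		for key, encoder, datum in data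
-- 		if datum is not None
-- 	)
-- ===== SOURCE B (Python) =====
-- from typing import Optional
--
--
-- def encode_number(number: int, significant_digits: int = 3) -> str:
--     assert 0 <= number <= int('9' * 26)
--     assert 1 < significant_digits
--     string = str(number)
--     return string[:significant_digits] + ' abcdefghijklmnopqrstuvwxyz'[len(string)]
--
--
-- def encode_users(users: int) -> str:
--     return encode_number(users)
--
--
-- ROLE_CODES = {
--     'domaincontroller_master': 'M',
--     'domaincontroller_backup': 'B',
--     'domaincontroller_slave': 'S',
--     'memberserver': 'm',
--     'basesystem': 'b',
-- }
--
--
-- def encode_role(role: str) -> str: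
--     try:
--         return ROLE_CODES[role]
--     except KeyError:
--         raise ValueError('Invalid role %r' % (role, ))
--
--
-- def encode_additional_info(users: Optional[int] = None, role: Optional[str] = None) -> str:
--     if users is None:
--         return '' if role is None else 'R:' + encode_role(role)
--     if role is None:
--         return 'U:' + encode_users(users)
--     return 'U:' + encode_users(users) + ',R:' + encode_role(role)
-- ===== Notes on version B (the rewrite author's own statement) =====
-- stated objective: simpler
-- what changed: Replaces the list-of-tuples dispatch table with its filtering generator and ','.join by a direct four-way case split on (users, role) that concatenates the pieces itself, and replaces encode_role's if-chain by a constant dict lookup (re-raised as the same ValueError).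
import Mathlib
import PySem

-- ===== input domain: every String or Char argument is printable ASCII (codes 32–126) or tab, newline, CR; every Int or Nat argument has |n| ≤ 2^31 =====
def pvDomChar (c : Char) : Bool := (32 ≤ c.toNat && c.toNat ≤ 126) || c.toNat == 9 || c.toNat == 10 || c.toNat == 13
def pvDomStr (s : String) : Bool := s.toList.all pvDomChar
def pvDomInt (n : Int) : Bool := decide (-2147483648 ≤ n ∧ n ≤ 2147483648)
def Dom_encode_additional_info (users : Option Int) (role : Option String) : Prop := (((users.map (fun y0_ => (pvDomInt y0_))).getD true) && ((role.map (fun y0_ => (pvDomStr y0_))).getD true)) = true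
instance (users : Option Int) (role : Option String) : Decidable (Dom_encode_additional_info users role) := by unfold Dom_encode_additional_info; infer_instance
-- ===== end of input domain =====

-- B replaces A's list-of-tuples dispatch table + filtering join with a direct four-way
-- case split on (users, role) that concatenates the pieces itself, and looks the role
-- code up in a constant table instead of an if-chain (objective: simpler; same cost).

-- ===== PORT A =====
-- encode_number / encode_users (shared verbatim by Source A and Source B).
-- `none` = the AssertionError for number outside [0, int('9'*26)] (excluded by Pre_).
-- Inside the assert the string has at most 26 digits, so the Python index
-- ' abcdefghijklmnopqrstuvwxyz'[len(string)] never raises; pyGetD's default is unreachable.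
def pvEncodeNumber (number : Int) : Option (List Char) :=
  if 0 ≤ number ∧ number ≤ 99999999999999999999999999 then
    let string := PySem.Int.toChars number
    some (PySem.Chars.slice string none (some 3) ++
      [PySem.List.pyGetD " abcdefghijklmnopqrstuvwxyz".toList ((string.length : Int)) ' '])
  else none

def pvEncodeUsers (users : Int) : Option (List Char) := pvEncodeNumber users

-- Source A's encode_role: if-chain; `none` = the ValueError (excluded by Pre_)
def pvEncodeRoleA (role : String) : Option (List Char) :=
  if role = "domaincontroller_master" then some ['M']
  else if role = "domaincontroller_backup" then some ['B']
  else if role = "domaincontroller_slave" then some ['S']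
  else if role = "memberserver" then some ['m']
  else if role = "basesystem" then some ['b']
  else none

-- the data table, then the filtering generator folded into ",".join; an encoder
-- exception (Option.getD's [] default) is unreachable under Pre_.
def encode_additional_info (users : Option Int) (role : Option String) : String :=
  let data : List (List Char × Option (Option (List Char))) :=
    [(['U'], users.map pvEncodeUsers), (['R'], role.map pvEncodeRoleA)]
  let pieces : List (List Char) :=
    data.foldl (fun acc kd =>
      match kd.2 with
      | none => acc
      | some ev => acc ++ [kd.1 ++ ':' :: ev.getD []]) []
  String.ofList (PySem.Chars.join [','] pieces)

-- ===== PORT B =====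
-- Source B's ROLE_CODES dict lookup (KeyError re-raised as ValueError = none, excluded by Pre_)
def pvRoleCodes : PySem.Dict String (List Char) :=
  (((((PySem.Dict.empty.insert "domaincontroller_master" ['M']).insert
      "domaincontroller_backup" ['B']).insert
      "domaincontroller_slave" ['S']).insert
      "memberserver" ['m']).insert
      "basesystem" ['b'])

def pvEncodeRoleB (role : String) : Option (List Char) := pvRoleCodes.get? role

def encode_additional_info_alt (users : Option Int) (role : Option String) : String :=
  match users, role with
  | none, none => ""
  | none, some r => String.ofList ('R' :: ':' :: (pvEncodeRoleB r).getD [])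
  | some u, none => String.ofList ('U' :: ':' :: (pvEncodeUsers u).getD [])
  | some u, some r =>
      String.ofList ('U' :: ':' :: (pvEncodeUsers u).getD [] ++
                 ',' :: 'R' :: ':' :: (pvEncodeRoleB r).getD [])

-- ===== PRECONDITION & SPEC =====
-- Pre_ excludes exactly the inputs where A raises: users outside [0, int('9'*26)]
-- (AssertionError) and a role other than the five known ones (ValueError).
def Pre_encode_additional_info (users : Option Int) (role : Option String) : Prop :=
  ((users.map (fun u => decide (0 ≤ u ∧ u ≤ 99999999999999999999999999))).getD true = true) ∧
  ((role.map (fun r => decide (r = "domaincontroller_master" ∨ r = "domaincontroller_backup" ∨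
      r = "domaincontroller_slave" ∨ r = "memberserver" ∨ r = "basesystem"))).getD true = true)
instance (users : Option Int) (role : Option String) : Decidable (Pre_encode_additional_info users role) := by unfold Pre_encode_additional_info; infer_instance

def pvWitness_encode_additional_info : Option Int × Option String := (some 2500, some "memberserver")

def Spec_encode_additional_info (users : Option Int) (role : Option String) (out : String) : Prop := out = encode_additional_info_alt users role
instance (users : Option Int) (role : Option String) (out : String) : Decidable (Spec_encode_additional_info users role out) := by unfold Spec_encode_additional_info; infer_instance

-- ===== CLAIM (what is proved, stated in full; the proofs are below) =====
def Claim_equal_encode_additional_info : Prop := ∀ (users : Option Int) (role : Option String), Dom_encode_additional_info users role → Pre_encode_additional_info users role → Spec_encode_additional_info users role (encode_additional_info users role)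

-- ===== LEMMAS AND PROOFS =====
-- the two role encoders agree on the five admitted roles
theorem pvEncodeRole_eq (r : String)
    (h : r = "domaincontroller_master" ∨ r = "domaincontroller_backup" ∨
         r = "domaincontroller_slave" ∨ r = "memberserver" ∨ r = "basesystem") :
    pvEncodeRoleA r = pvEncodeRoleB r := by
  rcases h with h | h | h | h | h <;> subst h <;> decide

-- ===== VERDICT (by name: the statement is the Claim_ definition above) =====
theorem encode_additional_info_spec : Claim_equal_encode_additional_info := by
  intro users role _ hpre
  obtain ⟨hu, hr⟩ := hpre
  unfold Spec_encode_additional_info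
  cases users <;> cases role <;>
    simp_all [encode_additional_info, encode_additional_info_alt,
      PySem.Chars.join, List.intercalate, pvEncodeRole_eq]
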